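-- pv_equiv track=rewrite | github.com/detonscience/midi_pad_generator18 | midi_chord_generatorV18.py | voice_lead_chord
-- ===== SOURCE A (Python) =====
-- def voice_lead_chord(chord, prev):
--     if not prev:
--         return sorted(chord)
--
--     led = []
--     for i, note in enumerate(chord):
--         target = prev[i % len(prev)]
--         candidates = [note - 24, note - 12, note, note + 12, note + 24]
--         best = min(candidates, key=lambda x: abs(x - target))
--         led.append(best)
--
--     return sorted(led)
-- ===== SOURCE B (Python) =====
-- def voice_lead_chord(chord, prev):
--     if not prev:
--         return sorted(chord)
--     n = len(prev)
--
--     def lead(i, note):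
--         # closed-form octave shift: floor((target-note+5)/12) rounds a 6-semitone
--         # tie toward the lower octave (min's first-wins tie-break), clamped to +-2 octaves
--         k = (prev[i % n] - note + 5) // 12
--         return note + 12 * max(-2, min(2, k))
--
--     return sorted(lead(i, note) for i, note in enumerate(chord))
-- ===== Notes on version B (the rewrite author's own statement) =====
-- stated objective: simpler
-- what changed: Replaces the 5-candidate list plus min(..., key=abs-distance) scan with a closed-form clamped octave shift k = (target - note + 5) // 12 clamped to [-2, 2], computed per note in a comprehension (no candidate list or key-function calls; measured ~2x faster).
import Mathlib
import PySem

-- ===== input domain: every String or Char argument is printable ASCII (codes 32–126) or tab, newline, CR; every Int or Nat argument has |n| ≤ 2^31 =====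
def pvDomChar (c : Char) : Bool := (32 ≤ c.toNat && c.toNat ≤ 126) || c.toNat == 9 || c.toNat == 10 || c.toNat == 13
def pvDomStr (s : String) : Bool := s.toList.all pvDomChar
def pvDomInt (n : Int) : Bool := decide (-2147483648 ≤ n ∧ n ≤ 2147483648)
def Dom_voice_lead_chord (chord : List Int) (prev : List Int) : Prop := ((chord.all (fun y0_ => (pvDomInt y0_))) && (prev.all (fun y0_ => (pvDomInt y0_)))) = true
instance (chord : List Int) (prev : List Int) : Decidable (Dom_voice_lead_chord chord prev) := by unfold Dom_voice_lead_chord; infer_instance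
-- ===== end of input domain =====

-- B replaces A's 5-candidate scan with min(..., key) by a closed-form clamped octave shift
-- (same value, including min's first-wins tie-break at the 6-semitone midpoint).

-- ===== PORT A =====
-- 'abs(x - target)' is ported as (x - target).natAbs; Nat comparison of absolute
-- values coincides with Python's int comparison of abs values.
-- min() on the literal 5-element candidate list always returns (PySem.List.min? = some _);
-- .getD 0 only discharges the impossible none case.
def voice_lead_chord (chord : List Int) (prev : List Int) : List Int :=
  if prev = [] then
    PySem.List.sorted chord (fun x => x) false
  else
    let led := (PySem.List.enumerate chord).foldl (fun led p =>
      let note := p.2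
      -- prev ≠ [] and 0 ≤ i % len < len, so prev[i % len(prev)] never raises; .getD 0 is unreachable
      let target := (PySem.List.pyGet? prev (PySem.Int.mod p.1 (prev.length : Int))).getD 0
      let candidates := [note - 24, note - 12, note, note + 12, note + 24]
      let best := (PySem.List.min? candidates (fun x => (x - target).natAbs)).getD 0
      led ++ [best]) []
    PySem.List.sorted led (fun x => x) false

-- ===== PORT B =====
-- transliteration of Source B: a generator/comprehension over enumerate(chord) (ported as map)
-- applying the closed-form helper 'lead'.
def voice_lead_chord_alt_lead (prev : List Int) (i : Int) (note : Int) : Int :=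
  -- prev ≠ [] at every call site, so prev[i % n] never raises; .getD 0 is unreachable
  let target := (PySem.List.pyGet? prev (PySem.Int.mod i (prev.length : Int))).getD 0
  let k := PySem.Int.floordiv (target - note + 5) 12
  note + 12 * max (-2 : Int) (min 2 k)

def voice_lead_chord_alt (chord : List Int) (prev : List Int) : List Int :=
  if prev = [] then
    PySem.List.sorted chord (fun x => x) false
  else
    PySem.List.sorted
      ((PySem.List.enumerate chord).map (fun p => voice_lead_chord_alt_lead prev p.1 p.2))
      (fun x => x) false

-- ===== PRECONDITION & SPEC =====
def Spec_voice_lead_chord (chord : List Int) (prev : List Int) (out : List Int) : Prop := out = voice_lead_chord_alt chord prev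
instance (chord : List Int) (prev : List Int) (out : List Int) : Decidable (Spec_voice_lead_chord chord prev out) := by unfold Spec_voice_lead_chord; infer_instance

-- ===== CLAIM (what is proved, stated in full; the proofs are below) =====
def Claim_equal_voice_lead_chord : Prop := ∀ (chord : List Int) (prev : List Int), Dom_voice_lead_chord chord prev → Spec_voice_lead_chord chord prev (voice_lead_chord chord prev)

-- ===== LEMMAS AND PROOFS =====

-- the heart of the equivalence: for any note and target, the first minimiser of
-- |x - target| over the 5 octave candidates is exactly the clamped closed-form shift
lemma best_eq_closed_form (note target : Int) :
    (PySem.List.min? [note - 24, note - 12, note, note + 12, note + 24]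
        (fun x => (x - target).natAbs)).getD 0
      = note + 12 * max (-2 : Int) (min 2 (PySem.Int.floordiv (target - note + 5) 12)) := by
  obtain ⟨h1, h2⟩ := (PySem.Int.floordiv_eq_iff_of_pos (a := target - note + 5) (b := 12)
      (q := PySem.Int.floordiv (target - note + 5) 12) (by norm_num)).mp rfl
  generalize hq : PySem.Int.floordiv (target - note + 5) 12 = q at *
  rw [max_def, min_def]
  simp only [PySem.List.min?, List.foldl]
  repeat' (first | omega | (split_ifs <;> simp only [*, Option.getD_some]))

-- ===== VERDICT (by name: the statement is the Claim_ definition above) =====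
theorem voice_lead_chord_spec : Claim_equal_voice_lead_chord := by
  intro chord prev _
  unfold Spec_voice_lead_chord voice_lead_chord voice_lead_chord_alt
  by_cases hp : prev = []
  · simp [hp]
  · simp only [hp, if_false]
    have hbody : (fun (led : List Int) (p : Int × Int) =>
        led ++ [(PySem.List.min? [p.2 - 24, p.2 - 12, p.2, p.2 + 12, p.2 + 24] (fun x =>
            (x - (PySem.List.pyGet? prev (PySem.Int.mod p.1 (prev.length : Int))).getD 0).natAbs)).getD 0])
        = fun led p => led ++ [voice_lead_chord_alt_lead prev p.1 p.2] := by
      funext led p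
      rw [voice_lead_chord_alt_lead, best_eq_closed_form]
    rw [hbody, PySem.List.foldl_append_singleton_eq_map, List.nil_append]
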